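-- pv_equiv track=rewrite | github.com/Ortaggi/aoc25 | d7/main.py | can_equal
-- ===== SOURCE A (Python) =====
-- def can_equal(parts: list[int], goal: int, cur: int | None = None):
--     if len(parts) == 0:
--         return cur == goal
--     if can_equal(parts[1:], goal, cur*parts[0] if cur else parts[0]):
--         return True
--     if can_equal(parts[1:], goal, cur+parts[0] if cur else parts[0]):
--         return True
--     return False
-- ===== SOURCE B (Python) =====
-- def can_equal(parts: list[int], goal: int, cur: int | None = None):
--     reach = {cur}
--     for p in parts:
--         nxt = set()
--         for v in reach:
--             if v:
--                 nxt.add(v * p)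
--                 nxt.add(v + p)
--             else:
--                 nxt.add(p)
--         reach = nxt
--     return goal in reach
-- ===== Notes on version B (the rewrite author's own statement) =====
-- stated objective: alternative
-- what changed: Replaced A's branching recursion over operator choices with a single forward pass that maintains the set of reachable accumulator values (seeded with cur, mirroring the falsy-cur rule), then tests goal membership; it dedupes positions but on random inputs results rarely collide, so cost is similar.
import Mathlib
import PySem

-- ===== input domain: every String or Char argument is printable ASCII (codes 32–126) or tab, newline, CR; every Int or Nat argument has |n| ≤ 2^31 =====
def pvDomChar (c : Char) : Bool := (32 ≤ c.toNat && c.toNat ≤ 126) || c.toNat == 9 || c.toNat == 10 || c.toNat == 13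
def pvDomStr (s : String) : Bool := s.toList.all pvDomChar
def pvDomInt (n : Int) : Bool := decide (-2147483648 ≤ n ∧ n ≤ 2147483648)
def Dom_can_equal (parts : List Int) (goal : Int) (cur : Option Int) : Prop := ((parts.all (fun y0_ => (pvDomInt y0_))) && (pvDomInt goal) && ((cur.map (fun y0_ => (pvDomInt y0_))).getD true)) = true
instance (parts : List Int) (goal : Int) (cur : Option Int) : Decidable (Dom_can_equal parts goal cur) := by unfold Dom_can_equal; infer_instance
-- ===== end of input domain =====

-- B replaces A's branching recursion with one forward pass over a set of reachable accumulator values (objective: alternative decomposition; same worst-case cost).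

-- ===== PORT A =====
def can_equal (parts : List Int) (goal : Int) (cur : Option Int) : Bool :=
  match parts with
  | [] => cur == some goal
  | p :: rest =>
    -- 'cur*parts[0] if cur else parts[0]': truthy cur = some nonzero
    let mulNext : Int := match cur with
      | some c => if c ≠ 0 then c * p else p
      | none => p
    let addNext : Int := match cur with
      | some c => if c ≠ 0 then c + p else p
      | none => p
    if can_equal rest goal (some mulNext) then true
    else if can_equal rest goal (some addNext) then true
    else false

-- ===== PORT B =====
-- inner loop: 'for v in reach: if v: nxt.add(v*p); nxt.add(v+p) else: nxt.add(p)'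
def canEqualStep (p : Int) (reach : PySem.Set (Option Int)) : PySem.Set (Option Int) :=
  reach.foldl (fun nxt v =>
    match v with
    | some c =>
      if c ≠ 0 then PySem.Set.add (PySem.Set.add nxt (some (c * p))) (some (c + p))
      else PySem.Set.add nxt (some p)
    | none => PySem.Set.add nxt (some p)) PySem.Set.empty

def can_equal_alt (parts : List Int) (goal : Int) (cur : Option Int) : Bool :=
  let reach := parts.foldl (fun reach p => canEqualStep p reach) (PySem.Set.ofList [cur])
  PySem.Set.contains reach (some goal)

-- ===== PRECONDITION & SPEC =====
def Spec_can_equal (parts : List Int) (goal : Int) (cur : Option Int) (out : Bool) : Prop := out = can_equal_alt parts goal cur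
instance (parts : List Int) (goal : Int) (cur : Option Int) (out : Bool) : Decidable (Spec_can_equal parts goal cur out) := by unfold Spec_can_equal; infer_instance

-- ===== CLAIM (what is proved, stated in full; the proofs are below) =====
def Claim_equal_can_equal : Prop := ∀ (parts : List Int) (goal : Int) (cur : Option Int), Dom_can_equal parts goal cur → Spec_can_equal parts goal cur (can_equal parts goal cur)

-- ===== LEMMAS AND PROOFS =====

theorem any_set_add {α : Type} [BEq α] [LawfulBEq α] (s : PySem.Set α) (x : α) (f : α → Bool) :
    (PySem.Set.add s x).any f = (s.any f || f x) := by
  simp only [PySem.Set.add, PySem.Set.contains]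
  split
  · rename_i h
    have hx : x ∈ s := by simpa using h
    by_cases hf : f x
    · simp [hf, List.any_eq_true.mpr ⟨x, hx, hf⟩]
    · simp [hf]
  · simp

theorem any_foldl_step (p : Int) (f : Option Int → Bool) (S : List (Option Int))
    (acc : PySem.Set (Option Int)) :
    (S.foldl (fun nxt v =>
      match v with
      | some c =>
        if c ≠ 0 then PySem.Set.add (PySem.Set.add nxt (some (c * p))) (some (c + p))
        else PySem.Set.add nxt (some p)
      | none => PySem.Set.add nxt (some p)) acc).any f
    = (acc.any f || S.any (fun v =>
        match v with
        | some c => if c ≠ 0 then f (some (c * p)) || f (some (c + p)) else f (some p)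
        | none => f (some p))) := by
  induction S generalizing acc with
  | nil => simp
  | cons v rest ih =>
    simp only [List.foldl_cons, List.any_cons, ih]
    cases v with
    | none => rw [any_set_add]; simp [Bool.or_assoc]
    | some c =>
      rcases eq_or_ne c 0 with hc | hc
      · simp [hc, any_set_add, Bool.or_assoc]
      · simp [hc, any_set_add, Bool.or_assoc]

theorem can_equal_cons (p : Int) (rest : List Int) (goal : Int) (v : Option Int) :
    can_equal (p :: rest) goal v =
      (match v with
       | some c => if c ≠ 0 then can_equal rest goal (some (c * p)) || can_equal rest goal (some (c + p))
                   else can_equal rest goal (some p)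
       | none => can_equal rest goal (some p)) := by
  cases v with
  | none => cases hA : can_equal rest goal (some p) <;> simp [can_equal, hA]
  | some c =>
    rcases eq_or_ne c 0 with hc | hc
    · cases hA : can_equal rest goal (some p) <;> simp [can_equal, hc, hA]
    · cases hA : can_equal rest goal (some (c * p)) <;>
        cases hB : can_equal rest goal (some (c + p)) <;>
        simp [can_equal, hc, hA, hB]

theorem reach_any (parts : List Int) (goal : Int) (S : PySem.Set (Option Int)) :
    PySem.Set.contains (parts.foldl (fun reach p => canEqualStep p reach) S) (some goal)
    = S.any (fun v => can_equal parts goal v) := by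
  induction parts generalizing S with
  | nil =>
    apply Bool.eq_iff_iff.mpr
    simp only [List.foldl_nil, PySem.Set.contains, can_equal, List.any_eq_true,
      List.contains_iff_mem, beq_iff_eq]
    constructor
    · intro h; exact ⟨some goal, h, rfl⟩
    · rintro ⟨v, hv, h⟩; cases v <;> simp_all
  | cons p rest ih =>
    simp only [List.foldl_cons]
    rw [ih]
    unfold canEqualStep
    rw [any_foldl_step]
    simp only [PySem.Set.empty, List.any_nil, Bool.false_or]
    exact List.any_congr rfl (fun v => (can_equal_cons p rest goal v).symm)

-- ===== VERDICT (by name: the statement is the Claim_ definition above) =====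
theorem can_equal_spec : Claim_equal_can_equal := by
  intro parts goal cur _
  unfold Spec_can_equal can_equal_alt
  rw [reach_any]
  have h1 : PySem.Set.ofList [cur] = [cur] := by
    simp [PySem.Set.ofList, PySem.Set.add, PySem.Set.contains]
  rw [h1]
  simp
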